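-- pv_equiv track=rewrite | github.com/NNDSrinivas/autonomous-engineering-platform | backend/agent/org/learning_collector.py | _assess_pr_impact
-- ===== SOURCE A (Python) =====
-- from typing import Dict, List, Any
--
-- def _assess_pr_impact(files: List[str], pr: Dict[str, Any]) -> str:
--     """Assess PR impact scope based on files and content"""
--     # Check for customer-facing changes
--     customer_patterns = ['api/', 'public/', 'frontend/', 'ui/', 'web/']
--     if any(any(pattern in file_path.lower() for pattern in customer_patterns) for file_path in files):
--         return "CUSTOMER"
--
--     # Check for cross-team impact
--     shared_patterns = ['shared/', 'common/', 'lib/', 'utils/', 'core/']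
--     if any(any(pattern in file_path.lower() for pattern in shared_patterns) for file_path in files):
--         return "ORG"
--
--     # Check for team-wide impact
--     if len(files) > 5:
--         return "TEAM"
--
--     return "LOCAL"
-- ===== SOURCE B (Python) =====
-- def _assess_pr_impact(files, pr):
--     """Assess PR impact scope based on files and content.
--
--     Single pass: gather evidence (has_customer, has_shared) in one traversal,
--     short-circuiting as soon as a customer-facing file is found, then classify
--     by priority."""
--     customer_patterns = ['api/', 'public/', 'frontend/', 'ui/', 'web/']
--     shared_patterns = ['shared/', 'common/', 'lib/', 'utils/', 'core/']
--     has_customer = False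
--     has_shared = False
--     for file_path in files:
--         low = file_path.lower()
--         if any(p in low for p in customer_patterns):
--             has_customer = True
--             break
--         if not has_shared and any(p in low for p in shared_patterns):
--             has_shared = True
--     if has_customer:
--         return "CUSTOMER"
--     if has_shared:
--         return "ORG"
--     if len(files) > 5:
--         return "TEAM"
--     return "LOCAL"
-- ===== Notes on version B (the rewrite author's own statement) =====
-- stated objective: alternative
-- what changed: Replaces A's two separate short-circuiting scans over files (customer first, then shared) by a single evidence-gathering pass that records has_customer/has_shared booleans (breaking early on a customer match) followed by a priority-ordered classification.
import Mathlib
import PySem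

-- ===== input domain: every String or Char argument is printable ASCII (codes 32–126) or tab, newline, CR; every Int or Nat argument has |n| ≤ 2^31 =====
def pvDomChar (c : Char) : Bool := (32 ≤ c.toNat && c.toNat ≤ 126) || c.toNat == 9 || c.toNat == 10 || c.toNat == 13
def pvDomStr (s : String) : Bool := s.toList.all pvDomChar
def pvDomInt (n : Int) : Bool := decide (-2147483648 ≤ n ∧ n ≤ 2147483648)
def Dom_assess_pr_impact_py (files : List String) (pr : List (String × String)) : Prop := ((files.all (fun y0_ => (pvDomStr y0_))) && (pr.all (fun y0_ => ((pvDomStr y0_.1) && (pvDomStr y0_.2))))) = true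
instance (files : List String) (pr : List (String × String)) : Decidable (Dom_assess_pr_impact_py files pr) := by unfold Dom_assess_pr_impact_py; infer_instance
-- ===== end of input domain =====

-- B replaces A's two separate short-circuiting scans over the file list by one
-- evidence-gathering pass (has_customer/has_shared booleans, breaking early on a
-- customer match) followed by priority classification; same cost, alternative shape.


-- ===== PORT A =====
def assess_pr_impact_py (files : List String) (pr : List (String × String)) : String :=
  let customer_patterns := ["api/", "public/", "frontend/", "ui/", "web/"]
  if files.any (fun file_path =>
      customer_patterns.any (fun pattern => PySem.Str.isIn pattern (PySem.Str.lower file_path))) then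
    "CUSTOMER"
  else
    let shared_patterns := ["shared/", "common/", "lib/", "utils/", "core/"]
    if files.any (fun file_path =>
        shared_patterns.any (fun pattern => PySem.Str.isIn pattern (PySem.Str.lower file_path))) then
      "ORG"
    else if (files.length : Int) > 5 then "TEAM"
    else "LOCAL"

-- ===== PORT B =====
def pvAltCustomerPats : List String := ["api/", "public/", "frontend/", "ui/", "web/"]
def pvAltSharedPats : List String := ["shared/", "common/", "lib/", "utils/", "core/"]

-- the single evidence-gathering loop of Source B: returns (has_customer, has_shared)
def pvAltScan : List String → Bool → Bool × Bool
  | [], has_shared => (false, has_shared)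
  | file_path :: rest, has_shared =>
    let low := PySem.Str.lower file_path
    if pvAltCustomerPats.any (fun p => PySem.Str.isIn p low) then
      (true, has_shared)
    else
      pvAltScan rest
        (if has_shared then true else pvAltSharedPats.any (fun p => PySem.Str.isIn p low))

def assess_pr_impact_py_alt (files : List String) (pr : List (String × String)) : String :=
  let res := pvAltScan files false
  if res.1 then "CUSTOMER"
  else if res.2 then "ORG"
  else if (files.length : Int) > 5 then "TEAM"
  else "LOCAL"

-- ===== PRECONDITION & SPEC =====
def Spec_assess_pr_impact_py (files : List String) (pr : List (String × String)) (out : String) : Prop := out = assess_pr_impact_py_alt files pr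
instance (files : List String) (pr : List (String × String)) (out : String) : Decidable (Spec_assess_pr_impact_py files pr out) := by unfold Spec_assess_pr_impact_py; infer_instance

-- ===== CLAIM (what is proved, stated in full; the proofs are below) =====
def Claim_equal_assess_pr_impact_py : Prop := ∀ (files : List String) (pr : List (String × String)), Dom_assess_pr_impact_py files pr → Spec_assess_pr_impact_py files pr (assess_pr_impact_py files pr)

-- ===== LEMMAS AND PROOFS =====
def pvCust (fp : String) : Bool := pvAltCustomerPats.any (fun p => PySem.Str.isIn p (PySem.Str.lower fp))
def pvShared (fp : String) : Bool := pvAltSharedPats.any (fun p => PySem.Str.isIn p (PySem.Str.lower fp))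

theorem pvAltScan_fst (files : List String) (hs : Bool) :
    (pvAltScan files hs).1 = files.any pvCust := by
  induction files generalizing hs with
  | nil => rfl
  | cons f rest ih =>
    show (if pvCust f then (true, hs)
          else pvAltScan rest (if hs then true else pvShared f)).1 = (pvCust f || rest.any pvCust)
    cases h : pvCust f
    · simp [ih]
    · simp

theorem pvAltScan_snd (files : List String) (hs : Bool)
    (h : files.any pvCust = false) :
    (pvAltScan files hs).2 = (hs || files.any pvShared) := by
  induction files generalizing hs with
  | nil => simp [pvAltScan]
  | cons f rest ih =>
    simp only [List.any_cons, Bool.or_eq_false_iff] at h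
    obtain ⟨h1, h2⟩ := h
    show (if pvCust f then (true, hs)
          else pvAltScan rest (if hs then true else pvShared f)).2
        = (hs || (pvShared f || rest.any pvShared))
    rw [h1, if_neg (by simp), ih _ h2]
    cases hs <;> cases hsf : pvShared f <;> simp

-- ===== VERDICT (by name: the statement is the Claim_ definition above) =====
theorem assess_pr_impact_py_spec : Claim_equal_assess_pr_impact_py := by
  intro files pr _
  show assess_pr_impact_py files pr = assess_pr_impact_py_alt files pr
  have h1 := pvAltScan_fst files false
  change (if files.any pvCust then "CUSTOMER"
          else if files.any pvShared then "ORG"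
          else if (files.length : Int) > 5 then "TEAM" else "LOCAL")
      = (if (pvAltScan files false).1 then "CUSTOMER"
          else if (pvAltScan files false).2 then "ORG"
          else if (files.length : Int) > 5 then "TEAM" else "LOCAL")
  cases hc : files.any pvCust
  · have h2 := pvAltScan_snd files false hc
    rw [hc] at h1
    rw [h1, h2]
    simp
  · rw [hc] at h1
    rw [h1]
    simp
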